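-- pv_equiv track=rewrite | github.com/Mikhail-Lebedinskiy/Polykov2 | PROBNICS/SHOLCOVO/probnic_10(4-hours)/9/9.py | is_good_line
-- ===== SOURCE A (Python) =====
-- from math import prod
--
-- def is_good_line(line):
--     all_prod = prod(line)
--     all_sum = sum(line)
--     flag = True
--     for i in range(len(line)):
--         for j in range(i + 1, len(line)):
--             if 2 * (line[i] + line[j]) == all_sum:
--                 flag = False
--     if flag:
--         return False
--     if (min(line) * max(line)) ** 2 == all_prod:
--         return True
--     return False
-- ===== SOURCE B (Python) =====
-- def is_good_line(line):
--     total = sum(line)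
--     seen = set()
--     found = False
--     for x in line:
--         if total - 2 * x in seen:
--             found = True
--         seen.add(2 * x)
--     if not found:
--         return False
--     prod = 1
--     mn = mx = line[0]
--     for x in line:
--         prod *= x
--         if x < mn:
--             mn = x
--         if x > mx:
--             mx = x
--     return (mn * mx) ** 2 == prod
-- ===== Notes on version B (the rewrite author's own statement) =====
-- stated objective: faster
-- what changed: Replaced the O(n^2) double index loop over all pairs by a one-pass seen-set two-sum check, and computed prod/min/max in a single pass instead of three library traversals.
import Mathlib
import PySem

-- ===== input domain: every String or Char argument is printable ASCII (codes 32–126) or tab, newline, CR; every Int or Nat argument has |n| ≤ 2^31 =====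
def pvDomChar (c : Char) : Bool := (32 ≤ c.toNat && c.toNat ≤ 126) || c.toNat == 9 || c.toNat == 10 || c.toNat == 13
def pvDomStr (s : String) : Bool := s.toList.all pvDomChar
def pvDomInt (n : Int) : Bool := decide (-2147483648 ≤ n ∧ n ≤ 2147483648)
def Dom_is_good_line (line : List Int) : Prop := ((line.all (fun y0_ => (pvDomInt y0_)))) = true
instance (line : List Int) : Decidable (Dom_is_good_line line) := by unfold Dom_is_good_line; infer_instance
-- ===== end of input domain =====

-- B replaces A's O(n^2) double index loop by a one-pass seen-set two-sum check and a single
-- pass computing prod/min/max (objective: faster).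

-- ===== PORT A =====
def is_good_line (line : List Int) : Bool :=
  let all_prod := line.foldl (fun acc x => acc * x) 1
  let all_sum := line.foldl (fun acc x => acc + x) 0
  let n : Int := line.length
  let flag :=
    (PySem.List.pyRange 0 n 1).foldl (fun fl i =>
      (PySem.List.pyRange (i + 1) n 1).foldl (fun fl j =>
        if 2 * (PySem.List.pyGetD line i 0 + PySem.List.pyGetD line j 0) == all_sum then false
        else fl) fl) true
  if flag then false
  else
    -- min(line)/max(line): only reached with flag = false, hence line nonempty; none branch unreachable
    match PySem.List.min? line (fun x => x), PySem.List.max? line (fun x => x) with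
    | some mn, some mx => ((mn * mx) ^ 2 == all_prod)
    | _, _ => false

-- ===== PORT B =====
def is_good_line_alt (line : List Int) : Bool :=
  let total := line.foldl (fun acc x => acc + x) 0
  let st := line.foldl (fun (p : PySem.Set Int × Bool) x =>
      (PySem.Set.add p.1 (2 * x), p.2 || PySem.Set.contains p.1 (total - 2 * x)))
      (PySem.Set.empty, false)
  if !st.2 then false
  else
    match line with
    | [] => false   -- unreachable: found implies line nonempty
    | x0 :: _ =>
      let r := line.foldl (fun (s : Int × Int × Int) x =>
          (s.1 * x, if x < s.2.1 then x else s.2.1, if x > s.2.2 then x else s.2.2))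
          (1, x0, x0)
      ((r.2.1 * r.2.2) ^ 2 == r.1)

-- ===== PRECONDITION & SPEC =====
def Spec_is_good_line (line : List Int) (out : Bool) : Prop := out = is_good_line_alt line
instance (line : List Int) (out : Bool) : Decidable (Spec_is_good_line line out) := by unfold Spec_is_good_line; infer_instance

-- ===== CLAIM (what is proved, stated in full; the proofs are below) =====
def Claim_equal_is_good_line : Prop := ∀ (line : List Int), Dom_is_good_line line → Spec_is_good_line line (is_good_line line)

-- ===== LEMMAS AND PROOFS =====

/-- Structural "some pair at positions i < j sums (doubled) to t". -/
def hasPair (t : Int) : List Int → Bool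
  | [] => false
  | x :: xs => xs.any (fun y => 2 * (x + y) == t) || hasPair t xs

/-- The index-pair property both loops decide. -/
def Q (l : List Int) (t : Int) : Prop :=
  ∃ i j : Nat, i < j ∧ j < l.length ∧ 2 * (l.getD i 0 + l.getD j 0) = t

theorem hasPair_iff (t : Int) (l : List Int) : hasPair t l = true ↔ Q l t := by
  induction l with
  | nil =>
    simp only [hasPair, Q, Bool.false_eq_true, false_iff]
    rintro ⟨i, j, hij, hj, _⟩; simp at hj
  | cons x xs ih =>
    simp only [hasPair, Bool.or_eq_true, List.any_eq_true, beq_iff_eq, ih]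
    constructor
    · rintro (⟨y, hy, hxy⟩ | ⟨i, j, hij, hj, he⟩)
      · obtain ⟨k, hk, hyk⟩ := List.mem_iff_getElem.mp hy
        refine ⟨0, k + 1, by omega, by simp; omega, ?_⟩
        rw [List.getD_cons_zero, List.getD_cons_succ, List.getD_eq_getElem _ _ hk, hyk]
        exact hxy
      · exact ⟨i + 1, j + 1, by omega, by simp; omega,
          by rwa [List.getD_cons_succ, List.getD_cons_succ]⟩
    · rintro ⟨i, j, hij, hj, he⟩
      simp only [List.length_cons] at hj
      match i, j with
      | 0, j + 1 =>
        left
        rw [List.getD_cons_zero, List.getD_cons_succ] at he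
        refine ⟨xs.getD j 0, ?_, he⟩
        rw [List.getD_eq_getElem _ _ (by omega)]
        exact List.getElem_mem _
      | i + 1, j + 1 =>
        right
        exact ⟨i, j, by omega, by omega,
          by rwa [List.getD_cons_succ, List.getD_cons_succ] at he⟩

theorem foldl_if_false (p : Int → Bool) (js : List Int) (b : Bool) :
    js.foldl (fun fl j => if p j then false else fl) b = (b && !(js.any p)) := by
  induction js generalizing b with
  | nil => simp
  | cons j js ih =>
    simp only [List.foldl_cons, List.any_cons, ih]
    by_cases h : p j = true <;> simp [h]

theorem outer_foldl (g : Int → List Int) (p : Int → Int → Bool) (is : List Int) (b : Bool) :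
    is.foldl (fun fl i => (g i).foldl (fun fl j => if p i j then false else fl) fl) b
    = (b && is.all (fun i => !((g i).any (p i)))) := by
  induction is generalizing b with
  | nil => simp
  | cons i is ih => rw [List.foldl_cons, ih, foldl_if_false, Bool.and_assoc, List.all_cons]

theorem flag_iff (l : List Int) (t : Int) :
    (PySem.List.pyRange 0 (l.length : Int) 1).foldl (fun fl i =>
      (PySem.List.pyRange (i + 1) (l.length : Int) 1).foldl (fun fl j =>
        if 2 * (PySem.List.pyGetD l i 0 + PySem.List.pyGetD l j 0) == t then false
        else fl) fl) true = true ↔ ¬ Q l t := by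
  rw [outer_foldl, Bool.true_and, List.all_eq_true]
  constructor
  · intro h hq
    obtain ⟨i, j, hij, hj, he⟩ := hq
    have hi := h (i : Int) (by rw [PySem.List.mem_pyRange_one]; omega)
    rw [Bool.not_eq_eq_eq_not, Bool.not_true, List.any_eq_false] at hi
    have hj' : ((j : Int)) ∈ PySem.List.pyRange ((i : Int) + 1) (l.length : Int) 1 := by
      rw [PySem.List.mem_pyRange_one]; omega
    have := hi _ hj'
    simp only [beq_iff_eq] at this
    apply this
    rw [PySem.List.pyGetD_natCast, PySem.List.pyGetD_natCast]
    exact he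
  · intro hq i hi
    rw [PySem.List.mem_pyRange_one] at hi
    rw [Bool.not_eq_eq_eq_not, Bool.not_true, List.any_eq_false]
    intro j hj
    rw [PySem.List.mem_pyRange_one] at hj
    simp only [beq_iff_eq]
    intro he
    apply hq
    refine ⟨i.toNat, j.toNat, by omega, by omega, ?_⟩
    have h1 : (i.toNat : Int) = i := by omega
    have h2 : (j.toNat : Int) = j := by omega
    rw [← h1, ← h2, PySem.List.pyGetD_natCast, PySem.List.pyGetD_natCast] at he
    exact he

theorem flag_eq_not (l : List Int) (t : Int) :
    (PySem.List.pyRange 0 (l.length : Int) 1).foldl (fun fl i =>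
      (PySem.List.pyRange (i + 1) (l.length : Int) 1).foldl (fun fl j =>
        if 2 * (PySem.List.pyGetD l i 0 + PySem.List.pyGetD l j 0) == t then false
        else fl) fl) true = !hasPair t l := by
  cases hp : hasPair t l
  · simp only [Bool.not_false]
    exact (flag_iff l t).mpr (by rw [← hasPair_iff, hp]; simp)
  · simp only [Bool.not_true]
    rw [Bool.eq_false_iff]
    intro hf
    exact (flag_iff l t).mp hf ((hasPair_iff t l).mp hp)

theorem found_eq (l : List Int) (t : Int) (s : PySem.Set Int) (b : Bool) :
    (l.foldl (fun (p : PySem.Set Int × Bool) x =>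
      (PySem.Set.add p.1 (2 * x), p.2 || PySem.Set.contains p.1 (t - 2 * x))) (s, b)).2
    = (b || l.any (fun x => PySem.Set.contains s (t - 2 * x)) || hasPair t l) := by
  induction l generalizing s b with
  | nil => simp [hasPair]
  | cons x xs ih =>
    simp only [List.foldl_cons, ih, hasPair, List.any_cons]
    rw [Bool.eq_iff_iff]
    simp only [Bool.or_eq_true, List.any_eq_true, PySem.Set.contains_iff, PySem.Set.mem_add,
      beq_iff_eq]
    have harith : ∀ y : Int, (t - 2 * y = 2 * x) ↔ (2 * (x + y) = t) := fun y => by omega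
    simp only [harith]
    aesop

theorem triple_fold (l : List Int) (a b c : Int) :
    l.foldl (fun (s : Int × Int × Int) x =>
        (s.1 * x, if x < s.2.1 then x else s.2.1, if x > s.2.2 then x else s.2.2)) (a, b, c)
      = (l.foldl (fun acc x => acc * x) a,
         l.foldl (fun m x => if x < m then x else m) b,
         l.foldl (fun m x => if x > m then x else m) c) := by
  induction l generalizing a b c with
  | nil => rfl
  | cons x xs ih => simp [ih]

theorem minstep_eq : (fun (m x : Int) => if x < m then x else m) = (fun (m x : Int) => min m x) := by
  funext m x; rw [min_def]; split_ifs <;> omega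

theorem maxstep_eq : (fun (m x : Int) => if x > m then x else m) = (fun (m x : Int) => max m x) := by
  funext m x; rw [max_def]; split_ifs <;> omega

-- ===== VERDICT (by name: the statement is the Claim_ definition above) =====
theorem is_good_line_spec : Claim_equal_is_good_line := by
  intro line _
  unfold Spec_is_good_line is_good_line is_good_line_alt
  simp only [found_eq, flag_eq_not]
  have hempty : (line.any fun x =>
      PySem.Set.contains PySem.Set.empty (line.foldl (fun acc x => acc + x) 0 - 2 * x)) = false := by
    simp [PySem.Set.empty, PySem.Set.contains]
  rw [hempty]
  simp only [Bool.false_or]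
  cases hp : hasPair (line.foldl (fun acc x => acc + x) 0) line
  · simp
  · simp only [Bool.not_true, Bool.false_eq_true, if_false]
    cases line with
    | nil => simp [hasPair] at hp
    | cons x0 xs =>
      rw [PySem.List.min?_id_cons, PySem.List.max?_id_cons]
      simp only [triple_fold]
      rw [minstep_eq, maxstep_eq]
      simp only [List.foldl_cons, min_self, max_self]
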